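-- pv_equiv track=rewrite | github.com/Ghada-MST/Codezilla-Course | Codezilla Course-Section12/Return & Scopes.py | capitalize_char
-- ===== SOURCE A (Python) =====
-- def capitalize_char(text):
--   vowels = "aieou"
--   modified_text = ""
--   text_list = text.split()
--   for word in text_list:
--     #title() convert for example "HAPPY" to "Happy"
--     word_upper = word.title()
--     for letter in word_upper:
--       if letter in vowels:
--         modified_text += letter.capitalize()
--         continue
--       modified_text += letter
--     modified_text += " "
--   return modified_text
-- ===== SOURCE B (Python) =====
-- def capitalize_char(text):
--     table = str.maketrans("aieou", "AIEOU")
--     titled = " ".join(word.title() for word in text.split())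
--     if titled:
--         titled += " "
--     return titled.translate(table)
-- ===== Notes on version B (the rewrite author's own statement) =====
-- stated objective: idiomatic
-- what changed: B replaces A's interleaved double loop (per word, per character, appending with a vowel branch) by two phases: title-case the words and join them with spaces (plus A's trailing space when non-empty), then uppercase vowels in one pass via a str.maketrans translation table.
import Mathlib
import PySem

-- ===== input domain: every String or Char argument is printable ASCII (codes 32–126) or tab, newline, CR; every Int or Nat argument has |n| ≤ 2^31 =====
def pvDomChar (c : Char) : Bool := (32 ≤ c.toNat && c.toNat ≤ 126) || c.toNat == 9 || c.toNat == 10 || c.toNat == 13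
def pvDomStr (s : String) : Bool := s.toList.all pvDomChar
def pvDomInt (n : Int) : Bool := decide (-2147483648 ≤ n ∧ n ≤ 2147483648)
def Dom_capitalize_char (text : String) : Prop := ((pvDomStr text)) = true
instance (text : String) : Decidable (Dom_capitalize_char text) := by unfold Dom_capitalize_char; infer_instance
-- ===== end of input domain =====

-- B builds the result in two phases (title-case + join, then a vowel translation map)
-- instead of A's interleaved per-word/per-character accumulation; objective: idiomatic.

-- shared helper: word.title() (both Pythons call str.title); exact for ASCII,
-- where the "cased" characters are exactly the alphabetic ones
def pvTitle : List Char → Bool → List Char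
  | [], _ => []
  | c :: rest, prev =>
    if PySem.Chars.isalpha c then
      (if prev then PySem.Chars.lowerChar c else PySem.Chars.upperChar c) :: pvTitle rest true
    else c :: pvTitle rest false

-- ===== PORT A =====
def capitalize_char (text : String) : String :=
  let vowels : List Char := "aieou".toList
  let textList := PySem.Chars.split₀ text.toList
  String.mk (textList.foldl (fun modified word =>
    let wordUpper := pvTitle word false
    (wordUpper.foldl (fun m letter =>
      if letter ∈ vowels then m ++ [PySem.Chars.upperChar letter]
      else m ++ [letter]) modified) ++ [' ']) [])

-- ===== PORT B =====
-- str.maketrans("aieou", "AIEOU") applied characterwise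
def pvTrans (c : Char) : Char :=
  if c = 'a' then 'A' else if c = 'i' then 'I' else if c = 'e' then 'E'
  else if c = 'o' then 'O' else if c = 'u' then 'U' else c

def capitalize_char_alt (text : String) : String :=
  let titled := PySem.Chars.join [' ']
      ((PySem.Chars.split₀ text.toList).map (fun w => pvTitle w false))
  let titled := if titled.isEmpty then titled else titled ++ [' ']
  String.mk (titled.map pvTrans)

-- ===== PRECONDITION & SPEC =====
def Spec_capitalize_char (text : String) (out : String) : Prop := out = capitalize_char_alt text
instance (text : String) (out : String) : Decidable (Spec_capitalize_char text out) := by unfold Spec_capitalize_char; infer_instance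

-- ===== CLAIM (what is proved, stated in full; the proofs are below) =====
def Claim_equal_capitalize_char : Prop := ∀ (text : String), Dom_capitalize_char text → Spec_capitalize_char text (capitalize_char text)

-- ===== LEMMAS AND PROOFS =====

theorem pvTrans_spec (c : Char) :
    (if c ∈ ("aieou".toList) then [PySem.Chars.upperChar c] else [c]) = [pvTrans c] := by
  by_cases h : c ∈ ("aieou".toList)
  · simp only [h, if_true]
    fin_cases h <;> rfl
  · simp only [h, if_false]
    simp only [show ("aieou".toList) = ['a','i','e','o','u'] from rfl, List.mem_cons,
      List.not_mem_nil, or_false, not_or] at h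
    obtain ⟨h1, h2, h3, h4, h5⟩ := h
    simp [pvTrans, h1, h2, h3, h4, h5]

theorem inner_fold (w : List Char) (acc : List Char) :
    w.foldl (fun m letter =>
      if letter ∈ ("aieou".toList) then m ++ [PySem.Chars.upperChar letter]
      else m ++ [letter]) acc = acc ++ w.map pvTrans := by
  induction w generalizing acc with
  | nil => simp
  | cons c rest ih =>
    simp only [List.foldl_cons, List.map_cons]
    have hps := pvTrans_spec c
    by_cases h : c ∈ ("aieou".toList) <;>
      simp only [h, if_true, if_false] at hps ⊢ <;>
      rw [ih, hps] <;> simp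

theorem outer_fold (ws : List (List Char)) (acc : List Char) :
    ws.foldl (fun modified word =>
      let wordUpper := pvTitle word false
      (wordUpper.foldl (fun m letter =>
        if letter ∈ ("aieou".toList) then m ++ [PySem.Chars.upperChar letter]
        else m ++ [letter]) modified) ++ [' ']) acc
    = acc ++ ws.flatMap (fun w => (pvTitle w false).map pvTrans ++ [' ']) := by
  induction ws generalizing acc with
  | nil => simp
  | cons w rest ih =>
    simp only [List.foldl_cons, List.flatMap_cons]
    rw [inner_fold, ih]
    simp [List.append_assoc]

theorem flat_join (ts : List (List Char)) :
    ts.flatMap (fun t => t.map pvTrans ++ [' ']) =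
    (PySem.Chars.join [' '] ts).map pvTrans ++ (if ts.isEmpty then [] else [' ']) := by
  induction ts with
  | nil => simp [PySem.Chars.join_nil]
  | cons t rest ih =>
    cases rest with
    | nil => simp [PySem.Chars.join_singleton]
    | cons t' rest' =>
      simp only [List.flatMap_cons] at ih ⊢
      rw [ih]
      rw [PySem.Chars.join_cons_cons]
      simp [pvTrans, List.append_assoc]

theorem split₀_go_ne_nil (s cur : List Char) (acc : List (List Char))
    (hacc : ∀ w ∈ acc, w ≠ []) :
    ∀ w ∈ PySem.Chars.split₀.go s cur acc, w ≠ [] := by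
  induction s generalizing cur acc with
  | nil =>
    intro w hw
    unfold PySem.Chars.split₀.go at hw
    split at hw
    · exact hacc w (by simpa using hw)
    · rename_i hcur
      rcases (by simpa using hw : w ∈ acc ∨ w = cur.reverse) with h | h
      · exact hacc w h
      · subst h; simpa [List.isEmpty_iff] using hcur
  | cons c rest ih =>
    intro w hw
    unfold PySem.Chars.split₀.go at hw
    split at hw
    · split at hw
      · exact ih [] acc hacc w hw
      · rename_i hsp hcur
        refine ih [] (cur.reverse :: acc) ?_ w hw
        intro v hv
        rcases List.mem_cons.mp hv with h | h
        · subst h; simpa [List.isEmpty_iff] using hcur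
        · exact hacc v h
    · exact ih (c :: cur) acc hacc w hw

theorem split₀_ne_nil (s : List Char) : ∀ w ∈ PySem.Chars.split₀ s, w ≠ [] := by
  intro w hw
  exact split₀_go_ne_nil s [] [] (by simp) w hw

theorem pvTitle_ne_nil (w : List Char) (b : Bool) (h : w ≠ []) : pvTitle w b ≠ [] := by
  cases w with
  | nil => exact absurd rfl h
  | cons c rest =>
    unfold pvTitle
    split <;> simp

theorem join_isEmpty_iff (ts : List (List Char)) (h : ∀ t ∈ ts, t ≠ []) :
    (PySem.Chars.join [' '] ts).isEmpty = ts.isEmpty := by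
  cases ts with
  | nil => simp [PySem.Chars.join_nil]
  | cons t rest =>
    cases rest with
    | nil =>
      simp only [PySem.Chars.join_singleton, List.isEmpty_cons]
      simpa [List.isEmpty_iff] using h t (by simp)
    | cons t' rest' =>
      rw [PySem.Chars.join_cons_cons]
      have ht : t ≠ [] := h t (by simp)
      simp [ht]

-- ===== VERDICT (by name: the statement is the Claim_ definition above) =====
theorem capitalize_char_spec : Claim_equal_capitalize_char := by
  intro text _
  unfold Spec_capitalize_char capitalize_char capitalize_char_alt
  simp only []
  rw [outer_fold]
  set ws := PySem.Chars.split₀ text.toList with hws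
  have hne : ∀ t ∈ ws.map (fun w => pvTitle w false), t ≠ [] := by
    intro t ht
    rcases List.mem_map.mp ht with ⟨w, hw, rfl⟩
    exact pvTitle_ne_nil w false (split₀_ne_nil text.toList w hw)
  rw [show (ws.flatMap (fun w => (pvTitle w false).map pvTrans ++ [' ']))
      = (ws.map (fun w => pvTitle w false)).flatMap (fun t => t.map pvTrans ++ [' ']) by
      simp [List.flatMap_map]]
  rw [flat_join]
  rw [join_isEmpty_iff _ hne]
  by_cases hE : (ws.map (fun w => pvTitle w false)).isEmpty
  · have h0 : ws.map (fun w => pvTitle w false) = [] := List.isEmpty_iff.mp hE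
    simp [h0, PySem.Chars.join_nil]
  · have hE' : (ws.map (fun w => pvTitle w false)).isEmpty = false := by
      simpa using hE
    rw [hE']
    have hsp : pvTrans ' ' = ' ' := rfl
    simp [hsp]
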